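-- pv_equiv track=rewrite | github.com/VowpalWabbit/data-science | scripts/vw_tabular/vw_tabular.py | _actions_differ
-- ===== SOURCE A (Python) =====
-- def _actions_differ(old, new, coalesce_nulls):
--     '''Determine if two versions of an action (represented as dicts) differ, meaning that both versions provide different values for
--     the same feature.  Features starting with '_' are ignored.
--
--     Parameters:
--     old -- original version of the action
--     new -- new version of the action
--     coalesce_nulls -- determines how this function will behave when one action version contains a feature which is undefined (null) in
--                       the other.  If True, such cases will not be treated as differences.  If False, they will.
--
--     Returns:
--     True if the versions differ, or False if not
--     '''
--     for key, new_value in new.items():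
--         if isinstance(key, str) and key.startswith('_'):
--             continue
--         if key in old:
--             if old[key] != new_value:
--                 return True
--         else:
--             if not coalesce_nulls:
--                 return True
--     if not coalesce_nulls:
--         for key in old.keys():
--             if isinstance(key, str) and key.startswith('_'):
--                 continue
--             if key not in new:
--                 return True
--     return False
-- ===== SOURCE B (Python) =====
-- def _actions_differ(old, new, coalesce_nulls):
--     a = sorted(((k, v) for k, v in old.items()
--                 if not (isinstance(k, str) and k.startswith('_'))),
--                key=lambda p: p[0])
--     b = sorted(((k, v) for k, v in new.items()
--                 if not (isinstance(k, str) and k.startswith('_'))),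
--                key=lambda p: p[0])
--     if not coalesce_nulls:
--         return a != b
--     # two-pointer merge over the key-sorted item lists
--     i = j = 0
--     while i < len(a) and j < len(b):
--         ka, kb = a[i][0], b[j][0]
--         if ka < kb:
--             i += 1
--         elif kb < ka:
--             j += 1
--         elif a[i][1] != b[j][1]:
--             return True
--         else:
--             i += 1
--             j += 1
--     return False
-- ===== Notes on version B (the rewrite author's own statement) =====
-- stated objective: alternative
-- what changed: Replaces A's interleaved membership loops over both dicts by a sort-based algorithm: filter out underscore keys, sort both item lists by key, then either compare the sorted lists for equality (coalesce_nulls False) or run a two-pointer merge over them to find a shared key with differing values.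
import Mathlib
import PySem

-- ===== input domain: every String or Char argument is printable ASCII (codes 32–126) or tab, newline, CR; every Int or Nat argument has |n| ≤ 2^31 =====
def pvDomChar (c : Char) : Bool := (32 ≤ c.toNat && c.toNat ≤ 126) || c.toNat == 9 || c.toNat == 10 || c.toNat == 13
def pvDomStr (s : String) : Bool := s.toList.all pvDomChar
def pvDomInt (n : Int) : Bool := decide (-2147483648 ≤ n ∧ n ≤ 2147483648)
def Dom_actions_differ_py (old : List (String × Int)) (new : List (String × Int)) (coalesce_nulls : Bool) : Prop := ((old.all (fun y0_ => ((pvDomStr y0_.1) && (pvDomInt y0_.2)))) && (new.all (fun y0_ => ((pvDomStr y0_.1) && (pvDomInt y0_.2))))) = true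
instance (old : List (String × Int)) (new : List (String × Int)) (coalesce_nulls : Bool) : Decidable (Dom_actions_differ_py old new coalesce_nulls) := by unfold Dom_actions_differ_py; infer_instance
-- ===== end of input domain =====

-- ===== PORT A =====
-- B changes (objective: alternative): instead of A's interleaved membership loops, B filters
-- out underscore keys, sorts both item lists by key, and then either compares the sorted lists
-- (coalesce_nulls False) or runs a two-pointer merge to find a shared key with differing values.
-- All keys are Strings here, so Python's `isinstance(key, str)` test is always true.
def adUnd (k : String) : Bool := PySem.Str.startswith k "_"

def adLoopOld (dNew : PySem.Dict String Int) : List String → Bool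
  | [] => false
  | k :: rest =>
    if adUnd k then adLoopOld dNew rest
    else if !(dNew.contains k) then true
    else adLoopOld dNew rest

def adLoopNew (dOld dNew : PySem.Dict String Int) (cn : Bool) : List (String × Int) → Bool
  | [] => if !cn then adLoopOld dNew dOld.keys else false
  | (k, v) :: rest =>
    if adUnd k then adLoopNew dOld dNew cn rest
    else if dOld.contains k then
      if dOld.get? k ≠ some v then true else adLoopNew dOld dNew cn rest
    else if !cn then true
    else adLoopNew dOld dNew cn rest

def actions_differ_py (old : List (String × Int)) (new : List (String × Int)) (coalesce_nulls : Bool) : Bool :=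
  let dOld := PySem.Dict.ofList old
  let dNew := PySem.Dict.ofList new
  adLoopNew dOld dNew coalesce_nulls dNew.items

-- ===== PORT B =====
-- the key-sorted list of non-underscore items of a dict (Source B's `sorted(..., key=lambda p: p[0])`)
def abSorted (l : List (String × Int)) : List (String × Int) :=
  PySem.List.sorted (((PySem.Dict.ofList l).items).filter (fun p => !adUnd p.1)) (fun p => p.1) false

-- Source B's two-pointer while loop over the two key-sorted lists
def abMerge : List (String × Int) → List (String × Int) → Bool
  | [], _ => false
  | _ :: _, [] => false
  | (ka, va) :: as_, (kb, vb) :: bs =>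
    if ka < kb then abMerge as_ ((kb, vb) :: bs)
    else if kb < ka then abMerge ((ka, va) :: as_) bs
    else if va ≠ vb then true
    else abMerge as_ bs
termination_by a b => a.length + b.length

def actions_differ_py_alt (old : List (String × Int)) (new : List (String × Int)) (coalesce_nulls : Bool) : Bool :=
  let a := abSorted old
  let b := abSorted new
  if !coalesce_nulls then a != b
  else abMerge a b

-- ===== PRECONDITION & SPEC =====
def Spec_actions_differ_py (old : List (String × Int)) (new : List (String × Int)) (coalesce_nulls : Bool) (out : Bool) : Prop := out = actions_differ_py_alt old new coalesce_nulls
instance (old : List (String × Int)) (new : List (String × Int)) (coalesce_nulls : Bool) (out : Bool) : Decidable (Spec_actions_differ_py old new coalesce_nulls out) := by unfold Spec_actions_differ_py; infer_instance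

-- ===== CLAIM (what is proved, stated in full; the proofs are below) =====
def Claim_equal_actions_differ_py : Prop := ∀ (old : List (String × Int)) (new : List (String × Int)) (coalesce_nulls : Bool), Dom_actions_differ_py old new coalesce_nulls → Spec_actions_differ_py old new coalesce_nulls (actions_differ_py old new coalesce_nulls)

-- ===== LEMMAS AND PROOFS =====

lemma adLoopOld_eq_true_iff (dNew : PySem.Dict String Int) (ks : List String) :
    adLoopOld dNew ks = true ↔ ∃ k ∈ ks, adUnd k = false ∧ dNew.contains k = false := by
  induction ks with
  | nil => simp [adLoopOld]
  | cons k rest ih =>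
    by_cases hu : adUnd k = true
    · simp [adLoopOld, hu, ih]
    · simp only [Bool.not_eq_true] at hu
      by_cases hc : dNew.contains k = true
      · simp [adLoopOld, hu, hc, ih]
      · simp only [Bool.not_eq_true] at hc
        simp [adLoopOld, hu, hc]

lemma adLoopNew_eq_true_iff (dOld dNew : PySem.Dict String Int) (cn : Bool) (l : List (String × Int)) :
    adLoopNew dOld dNew cn l = true ↔
      (∃ p ∈ l, adUnd p.1 = false ∧
        ((dOld.contains p.1 = true ∧ dOld.get? p.1 ≠ some p.2) ∨
         (dOld.contains p.1 = false ∧ cn = false))) ∨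
      (cn = false ∧ adLoopOld dNew dOld.keys = true) := by
  induction l with
  | nil => cases cn <;> simp [adLoopNew]
  | cons p rest ih =>
    obtain ⟨k, v⟩ := p
    by_cases hu : adUnd k = true
    · simp [adLoopNew, hu, ih]
    · simp only [Bool.not_eq_true] at hu
      by_cases hc : dOld.contains k = true
      · by_cases hd : dOld.get? k = some v
        · simp [adLoopNew, hu, hc, hd, ih]
        · simp [adLoopNew, hu, hc, hd]
      · simp only [Bool.not_eq_true] at hc
        cases cn with
        | false => simp [adLoopNew, hu, hc]
        | true => simp [adLoopNew, hu, hc, ih]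

-- A's value, characterized in terms of filtered key membership and lookups
lemma A_char (old new : List (String × Int)) (cn : Bool) :
    actions_differ_py old new cn = true ↔
      (cn = false ∧ ¬ (∀ k, (k ∈ (PySem.Dict.ofList old).keys ∧ adUnd k = false) ↔
            (k ∈ (PySem.Dict.ofList new).keys ∧ adUnd k = false))) ∨
      (∃ k, (k ∈ (PySem.Dict.ofList old).keys ∧ adUnd k = false) ∧
            (k ∈ (PySem.Dict.ofList new).keys ∧ adUnd k = false) ∧
            (PySem.Dict.ofList old).get? k ≠ (PySem.Dict.ofList new).get? k) := by
  set dOld := PySem.Dict.ofList old with hdo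
  set dNew := PySem.Dict.ofList new with hdn
  have hN : dNew.keys.Nodup := PySem.Dict.nodup_keys_ofList new
  show adLoopNew dOld dNew cn dNew.items = true ↔ _
  rw [adLoopNew_eq_true_iff, adLoopOld_eq_true_iff]
  have hkeys : ∀ k, k ∈ dNew.keys ↔ ∃ v, (k, v) ∈ dNew.items := by
    intro k
    constructor
    · intro hk
      rcases List.mem_map.mp hk with ⟨p, hp, hpk⟩
      exact ⟨p.2, by rwa [show (k, p.2) = p from Prod.ext hpk.symm rfl]⟩
    · rintro ⟨v, hv⟩
      exact List.mem_map.mpr ⟨(k, v), hv, rfl⟩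
  have hget : ∀ k v, (k, v) ∈ dNew.items → dNew.get? k = some v := by
    intro k v hv
    exact PySem.Dict.get?_of_mem_items dNew hv hN
  constructor
  · rintro (⟨⟨k, v⟩, hp, hu, h⟩ | ⟨hcn, k, hk, hu, hnc⟩)
    · have hkN : k ∈ dNew.keys := (hkeys k).mpr ⟨v, hp⟩
      rcases h with ⟨hc, hne⟩ | ⟨hc, hcn⟩
      · refine Or.inr ⟨k, ⟨(PySem.Dict.contains_iff_mem_keys _ _).mp hc, hu⟩, ⟨hkN, hu⟩, ?_⟩
        rw [hget k v hp]; exact hne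
      · refine Or.inl ⟨hcn, fun hall => ?_⟩
        have := ((hall k).mpr ⟨hkN, hu⟩).1
        exact absurd ((PySem.Dict.contains_iff_mem_keys _ _).mpr this) (by simp [hc])
    · refine Or.inl ⟨hcn, fun hall => ?_⟩
      have := ((hall k).mp ⟨hk, hu⟩).1
      exact absurd ((PySem.Dict.contains_iff_mem_keys _ _).mpr this) (by simp [hnc])
  · rintro (⟨hcn, hne⟩ | ⟨k, ⟨hkO, hu⟩, ⟨hkN, _⟩, hne⟩)
    · rw [not_forall] at hne
      obtain ⟨k, hk⟩ := hne
      by_cases hO' : k ∈ dOld.keys ∧ adUnd k = false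
      · have hN' : ¬ (k ∈ dNew.keys ∧ adUnd k = false) := fun h => hk (iff_of_true hO' h)
        have hNk : dNew.contains k = false := by
          rcases Bool.eq_false_or_eq_true (dNew.contains k) with h | h
          · exact absurd ⟨(PySem.Dict.contains_iff_mem_keys _ _).mp h, hO'.2⟩ hN'
          · exact h
        exact Or.inr ⟨hcn, k, hO'.1, hO'.2, hNk⟩
      · have hN' : k ∈ dNew.keys ∧ adUnd k = false := by
          by_contra h
          exact hk (iff_of_false hO' h)
        obtain ⟨v, hv⟩ := (hkeys k).mp hN'.1
        have hOk : dOld.contains k = false := by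
          rcases Bool.eq_false_or_eq_true (dOld.contains k) with h | h
          · exact absurd ⟨(PySem.Dict.contains_iff_mem_keys _ _).mp h, hN'.2⟩ hO'
          · exact h
        exact Or.inl ⟨(k, v), hv, hN'.2, Or.inr ⟨hOk, hcn⟩⟩
    · obtain ⟨v, hv⟩ := (hkeys k).mp hkN
      refine Or.inl ⟨(k, v), hv, hu, Or.inl ⟨(PySem.Dict.contains_iff_mem_keys _ _).mpr hkO, ?_⟩⟩
      rw [← hget k v hv]; exact hne

lemma mem_abSorted (l : List (String × Int)) (k : String) (v : Int) :
    (k, v) ∈ abSorted l ↔ (k, v) ∈ (PySem.Dict.ofList l).items ∧ adUnd k = false := by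
  simp [abSorted, PySem.List.mem_sorted, List.mem_filter]

lemma abSorted_pairwise_lt (l : List (String × Int)) :
    (abSorted l).Pairwise (fun p q => p.1 < q.1) := by
  have hle : (abSorted l).Pairwise (fun p q => p.1 ≤ q.1) := PySem.List.sorted_pairwise _ _
  have hnd : ((abSorted l).map Prod.fst).Nodup := by
    have hperm : (abSorted l).Perm (((PySem.Dict.ofList l).items).filter (fun p => !adUnd p.1)) :=
      PySem.List.sorted_perm _ _ _
    have hsub : List.Sublist
        ((((PySem.Dict.ofList l).items).filter (fun p => !adUnd p.1)).map Prod.fst)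
        (((PySem.Dict.ofList l).items).map Prod.fst) :=
      List.Sublist.map Prod.fst List.filter_sublist
    have hkeys : (((PySem.Dict.ofList l).items).map Prod.fst).Nodup :=
      PySem.Dict.nodup_keys_ofList l
    exact (hperm.map Prod.fst).nodup_iff.mpr (hkeys.sublist hsub)
  have hne : (abSorted l).Pairwise (fun p q => p.1 ≠ q.1) := by
    rw [List.Nodup, List.pairwise_map] at hnd
    exact hnd
  exact (hle.and hne).imp (fun h => lt_of_le_of_ne h.1 h.2)

lemma abSorted_get? (l : List (String × Int)) (k : String) (v : Int)
    (h : (k, v) ∈ abSorted l) : (PySem.Dict.ofList l).get? k = some v :=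
  PySem.Dict.get?_of_mem_items _ ((mem_abSorted l k v).mp h).1 (PySem.Dict.nodup_keys_ofList l)

lemma abSorted_of_mem_keys (l : List (String × Int)) (k : String)
    (hk : k ∈ (PySem.Dict.ofList l).keys) (hu : adUnd k = false) :
    ∃ v, (PySem.Dict.ofList l).get? k = some v ∧ (k, v) ∈ abSorted l := by
  have hne : (PySem.Dict.ofList l).get? k ≠ none := fun hnone =>
    ((PySem.Dict.get?_eq_none_iff_not_mem_keys _ _).mp hnone) hk
  obtain ⟨v, hv⟩ := Option.ne_none_iff_exists'.mp hne
  exact ⟨v, hv, (mem_abSorted l k v).mpr ⟨PySem.Dict.mem_items_of_get?_eq_some _ hv, hu⟩⟩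

-- correctness of the two-pointer merge on key-sorted lists with distinct keys
lemma abMerge_iff (a b : List (String × Int))
    (ha : a.Pairwise (fun p q => p.1 < q.1)) (hb : b.Pairwise (fun p q => p.1 < q.1)) :
    abMerge a b = true ↔ ∃ k v w, (k, v) ∈ a ∧ (k, w) ∈ b ∧ v ≠ w := by
  fun_induction abMerge a b with
  | case1 b => simp
  | case2 x xs => simp
  | case3 ka va as_ kb vb bs hlt ih =>
    rw [List.pairwise_cons] at ha
    have hbk : ∀ p ∈ (kb, vb) :: bs, ka < p.1 := by
      intro p hp
      rcases List.mem_cons.mp hp with h | h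
      · rw [h]; exact hlt
      · exact lt_trans hlt ((List.pairwise_cons.mp hb).1 p h)
    rw [ih ha.2 hb]
    constructor
    · rintro ⟨k, v, w, h1, h2, h3⟩
      exact ⟨k, v, w, List.mem_cons_of_mem _ h1, h2, h3⟩
    · rintro ⟨k, v, w, h1, h2, h3⟩
      rcases List.mem_cons.mp h1 with h | h
      · exfalso
        have : ka < k := by simpa [show k = ka from congrArg Prod.fst h] using hbk (k, w) h2
        simp [show k = ka from congrArg Prod.fst h] at this
      · exact ⟨k, v, w, h, h2, h3⟩
  | case4 ka va as_ kb vb bs hnlt hlt ih =>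
    rw [List.pairwise_cons] at hb
    have hak : ∀ p ∈ (ka, va) :: as_, kb < p.1 := by
      intro p hp
      rcases List.mem_cons.mp hp with h | h
      · rw [h]; exact hlt
      · exact lt_trans hlt ((List.pairwise_cons.mp ha).1 p h)
    rw [ih ha hb.2]
    constructor
    · rintro ⟨k, v, w, h1, h2, h3⟩
      exact ⟨k, v, w, h1, List.mem_cons_of_mem _ h2, h3⟩
    · rintro ⟨k, v, w, h1, h2, h3⟩
      rcases List.mem_cons.mp h2 with h | h
      · exfalso
        have : kb < k := by simpa [show k = kb from congrArg Prod.fst h] using hak (k, v) h1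
        simp [show k = kb from congrArg Prod.fst h] at this
      · exact ⟨k, v, w, h1, h, h3⟩
  | case5 ka va as_ kb vb bs hnlt1 hnlt2 hne =>
    have hkk : ka = kb := le_antisymm (not_lt.mp hnlt2) (not_lt.mp hnlt1)
    exact iff_of_true rfl ⟨ka, va, vb, List.mem_cons_self, by rw [hkk]; exact List.mem_cons_self, hne⟩
  | case6 ka va as_ kb vb bs hnlt1 hnlt2 heq ih =>
    have hkk : ka = kb := le_antisymm (not_lt.mp hnlt2) (not_lt.mp hnlt1)
    rw [not_not] at heq
    rw [List.pairwise_cons] at ha hb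
    rw [ih ha.2 hb.2]
    constructor
    · rintro ⟨k, v, w, h1, h2, h3⟩
      exact ⟨k, v, w, List.mem_cons_of_mem _ h1, List.mem_cons_of_mem _ h2, h3⟩
    · rintro ⟨k, v, w, h1, h2, h3⟩
      rcases List.mem_cons.mp h1 with h | h
      · -- head of a: its key is ka; the b-side pair must be the head (kb,vb), forcing v = w
        have hk : k = ka := congrArg Prod.fst h
        have hv : v = va := congrArg Prod.snd h
        rcases List.mem_cons.mp h2 with h' | h'
        · have hw : w = vb := congrArg Prod.snd h'
          exact absurd (by rw [hv, hw, heq]) h3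
        · exfalso
          have : kb < k := hb.1 (k, w) h'
          simp [hk, hkk] at this
      · rcases List.mem_cons.mp h2 with h' | h'
        · exfalso
          have hk : k = kb := congrArg Prod.fst h'
          have : ka < k := ha.1 (k, v) h
          simp [hk, hkk] at this
        · exact ⟨k, v, w, h, h', h3⟩

-- the sorted filtered item lists are equal iff the filtered key sets agree and shared values agree
lemma abSorted_eq_iff (old new : List (String × Int)) :
    abSorted old = abSorted new ↔
      (∀ k, (k ∈ (PySem.Dict.ofList old).keys ∧ adUnd k = false) ↔
            (k ∈ (PySem.Dict.ofList new).keys ∧ adUnd k = false)) ∧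
      (∀ k, (k ∈ (PySem.Dict.ofList old).keys ∧ adUnd k = false) →
            (k ∈ (PySem.Dict.ofList new).keys ∧ adUnd k = false) →
            (PySem.Dict.ofList old).get? k = (PySem.Dict.ofList new).get? k) := by
  have hkeymem : ∀ (l : List (String × Int)) (k : String),
      (k ∈ (PySem.Dict.ofList l).keys ∧ adUnd k = false) ↔ ∃ v, (k, v) ∈ abSorted l := by
    intro l k
    constructor
    · rintro ⟨hk, hu⟩
      obtain ⟨v, _, hm⟩ := abSorted_of_mem_keys l k hk hu
      exact ⟨v, hm⟩
    · rintro ⟨v, hv⟩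
      have := (mem_abSorted l k v).mp hv
      exact ⟨PySem.Dict.mem_keys_of_mem_items _ this.1, this.2⟩
  constructor
  · intro h
    constructor
    · intro k
      rw [hkeymem, hkeymem, h]
    · rintro k ⟨hk, hu⟩ _
      obtain ⟨v, hv, hm⟩ := abSorted_of_mem_keys old k hk hu
      rw [hv, abSorted_get? new k v (h ▸ hm)]
  · rintro ⟨hX, hY⟩
    have hmemiff : ∀ p : String × Int, p ∈ abSorted old ↔ p ∈ abSorted new := by
      rintro ⟨k, v⟩
      constructor
      · intro hm
        have hp := (hkeymem old k).mpr ⟨v, hm⟩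
        have hq := (hX k).mp hp
        have hg : (PySem.Dict.ofList new).get? k = some v := by
          rw [← hY k hp hq]; exact abSorted_get? old k v hm
        exact (mem_abSorted new k v).mpr ⟨PySem.Dict.mem_items_of_get?_eq_some _ hg, hp.2⟩
      · intro hm
        have hq := (hkeymem new k).mpr ⟨v, hm⟩
        have hp := (hX k).mpr hq
        have hg : (PySem.Dict.ofList old).get? k = some v := by
          rw [hY k hp hq]; exact abSorted_get? new k v hm
        exact (mem_abSorted old k v).mpr ⟨PySem.Dict.mem_items_of_get?_eq_some _ hg, hq.2⟩
    have hndo : (abSorted old).Nodup :=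
      (abSorted_pairwise_lt old).imp (fun h => by intro he; rw [he] at h; exact lt_irrefl _ h)
    have hndn : (abSorted new).Nodup :=
      (abSorted_pairwise_lt new).imp (fun h => by intro he; rw [he] at h; exact lt_irrefl _ h)
    have hperm : (abSorted old).Perm (abSorted new) :=
      (List.perm_ext_iff_of_nodup hndo hndn).mpr hmemiff
    have : PySem.List.sorted (((PySem.Dict.ofList new).items).filter (fun p => !adUnd p.1))
        (fun p : String × Int => p.1) = abSorted old := by
      apply PySem.List.sorted_eq_of_perm_of_pairwise_lt
      · exact hperm.trans (PySem.List.sorted_perm _ _ _)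
      · exact abSorted_pairwise_lt old
    exact this.symm

-- B's value, characterized the same way as A's
lemma B_char (old new : List (String × Int)) (cn : Bool) :
    actions_differ_py_alt old new cn = true ↔
      (cn = false ∧ ¬ (∀ k, (k ∈ (PySem.Dict.ofList old).keys ∧ adUnd k = false) ↔
            (k ∈ (PySem.Dict.ofList new).keys ∧ adUnd k = false))) ∨
      (∃ k, (k ∈ (PySem.Dict.ofList old).keys ∧ adUnd k = false) ∧
            (k ∈ (PySem.Dict.ofList new).keys ∧ adUnd k = false) ∧
            (PySem.Dict.ofList old).get? k ≠ (PySem.Dict.ofList new).get? k) := by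
  have hkeymem : ∀ (l : List (String × Int)) (k : String),
      (k ∈ (PySem.Dict.ofList l).keys ∧ adUnd k = false) ↔ ∃ v, (k, v) ∈ abSorted l := by
    intro l k
    constructor
    · rintro ⟨hk, hu⟩
      obtain ⟨v, _, hm⟩ := abSorted_of_mem_keys l k hk hu
      exact ⟨v, hm⟩
    · rintro ⟨v, hv⟩
      have := (mem_abSorted l k v).mp hv
      exact ⟨PySem.Dict.mem_keys_of_mem_items _ this.1, this.2⟩
  have hdiff : ∀ (k : String) (v w : Int), (k, v) ∈ abSorted old → (k, w) ∈ abSorted new →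
      ((PySem.Dict.ofList old).get? k ≠ (PySem.Dict.ofList new).get? k ↔ v ≠ w) := by
    intro k v w hv hw
    rw [abSorted_get? old k v hv, abSorted_get? new k w hw]
    simp
  cases cn with
  | true =>
    show abMerge (abSorted old) (abSorted new) = true ↔ _
    rw [abMerge_iff _ _ (abSorted_pairwise_lt old) (abSorted_pairwise_lt new)]
    simp only [Bool.true_eq_false, false_and, false_or]
    constructor
    · rintro ⟨k, v, w, h1, h2, h3⟩
      exact ⟨k, (hkeymem old k).mpr ⟨v, h1⟩, (hkeymem new k).mpr ⟨w, h2⟩,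
        (hdiff k v w h1 h2).mpr h3⟩
    · rintro ⟨k, h1, h2, h3⟩
      obtain ⟨v, h1'⟩ := (hkeymem old k).mp h1
      obtain ⟨w, h2'⟩ := (hkeymem new k).mp h2
      exact ⟨k, v, w, h1', h2', (hdiff k v w h1' h2').mp h3⟩
  | false =>
    show (abSorted old != abSorted new) = true ↔ _
    rw [bne_iff_ne]
    simp only [true_and]
    rw [Ne, abSorted_eq_iff]
    constructor
    · intro h
      by_cases hX : ∀ k, (k ∈ (PySem.Dict.ofList old).keys ∧ adUnd k = false) ↔
          (k ∈ (PySem.Dict.ofList new).keys ∧ adUnd k = false)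
      · refine Or.inr ?_
        by_contra hno
        push Not at hno
        exact h ⟨hX, fun k hp hq => hno k hp hq⟩
      · exact Or.inl hX
    · rintro (hX | ⟨k, hp, hq, hne⟩) hEq
      · exact hX hEq.1
      · exact hne (hEq.2 k hp hq)

-- ===== VERDICT (by name: the statement is the Claim_ definition above) =====
theorem actions_differ_py_spec : Claim_equal_actions_differ_py := by
  intro old new cn _
  unfold Spec_actions_differ_py
  rw [Bool.eq_iff_iff, A_char, B_char]
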